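-- pv_equiv track=rewrite | github.com/sidney/pbtech-shopping | normalizer.py | spec_coverage
-- ===== SOURCE A (Python) =====
-- REQUIRED_FIELDS: dict[str, list[str]] = {
--     "cables":   ["gbps", "max_watts", "length_m"],
--     "monitors": ["resolution_w", "refresh_hz", "screen_inches"],
-- }
--
-- def spec_coverage(rows: list[dict], category: str) -> dict:
--     """
--     Report how many rows have each required field populated.
--     Returns e.g. {"gbps": "18/20", "max_watts": "15/20", ...}
--     """
--     required = REQUIRED_FIELDS.get(category, [])
--     total = len(rows)
--     if total == 0:
--         return {}
--     coverage = {}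
--     for field in required:
--         filled = sum(1 for r in rows if r.get(field) is not None)
--         coverage[field] = f"{filled}/{total}"
--     return coverage
-- ===== SOURCE B (Python) =====
-- REQUIRED_FIELDS: dict[str, list[str]] = {
--     "cables":   ["gbps", "max_watts", "length_m"],
--     "monitors": ["resolution_w", "refresh_hz", "screen_inches"],
-- }
--
-- def spec_coverage(rows: list[dict], category: str) -> dict:
--     """Flatten the rows' own items into one list of populated required-field
--     names, then read each field's tally off that list with list.count."""
--     required = REQUIRED_FIELDS.get(category, [])
--     total = len(rows)
--     if total == 0:
--         return {}
--     req = set(required)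
--     present = [k for row in rows for k, v in row.items()
--                if v is not None and k in req]
--     return {f: f"{present.count(f)}/{total}" for f in required}
-- ===== Notes on version B (the rewrite author's own statement) =====
-- stated objective: alternative
-- what changed: A probes every row once per required field with a generator-sum of r.get(field) checks; B never probes by field: it flattens the rows' own items into one list of populated required-field names and reads each tally off that list with list.count, formatting from the required list. Pre_ only excludes association lists in which some row has a duplicated key, which encode no Python dict.
import Mathlib
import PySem

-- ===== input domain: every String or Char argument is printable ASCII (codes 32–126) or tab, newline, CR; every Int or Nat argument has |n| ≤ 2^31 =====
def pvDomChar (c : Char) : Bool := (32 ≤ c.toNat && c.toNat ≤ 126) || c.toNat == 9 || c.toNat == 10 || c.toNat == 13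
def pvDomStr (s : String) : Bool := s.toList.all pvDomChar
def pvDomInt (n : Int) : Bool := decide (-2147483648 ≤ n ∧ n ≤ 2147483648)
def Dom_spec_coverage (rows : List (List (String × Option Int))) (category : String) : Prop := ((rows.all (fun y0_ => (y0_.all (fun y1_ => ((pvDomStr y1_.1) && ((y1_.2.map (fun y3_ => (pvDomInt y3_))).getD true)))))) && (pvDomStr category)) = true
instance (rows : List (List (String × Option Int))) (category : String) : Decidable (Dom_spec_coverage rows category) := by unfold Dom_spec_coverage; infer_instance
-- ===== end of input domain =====

-- B replaces A's per-field probing of the rows by flattening the rows' items into one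
-- occurrence list of populated required fields and counting on that list (alternative
-- decomposition, similar cost). Equivalence is about the return value; neither mutates.


-- ===== PORT A =====
def reqFields : PySem.Dict String (List String) :=
  PySem.Dict.mk [("cables", ["gbps", "max_watts", "length_m"]),
                 ("monitors", ["resolution_w", "refresh_hz", "screen_inches"])]

def spec_coverage (rows : List (List (String × Option Int))) (category : String) : List (String × String) :=
  let required := reqFields.getD category []
  let total : Int := rows.length
  if total == 0 then []
  else
    (required.foldl (fun (cov : PySem.Dict String String) field =>
        let filled : Int := rows.foldl (fun s r =>
          if ((PySem.Dict.mk r).getD field none).isSome then s + 1 else s) 0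
        cov.insert field (PySem.Int.toStr filled ++ "/" ++ PySem.Int.toStr total))
      (PySem.Dict.mk [])).items

-- ===== PORT B =====
def spec_coverage_alt (rows : List (List (String × Option Int))) (category : String) : List (String × String) :=
  let required := reqFields.getD category []
  let total : Int := rows.length
  if total == 0 then []
  else
    let req : PySem.Set String := PySem.Set.ofList required
    let present : List String :=
      rows.flatMap (fun row =>
        ((PySem.Dict.mk row).items.filter (fun p => p.2.isSome && req.contains p.1)).map Prod.fst)
    (required.foldl (fun (out : PySem.Dict String String) f =>
        out.insert f (PySem.Int.toStr ((present.count f : Int)) ++ "/" ++ PySem.Int.toStr total))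
      (PySem.Dict.mk [])).items

-- ===== PRECONDITION & SPEC =====
-- Pre_ excludes only association lists in which some row has a duplicated key: such a list
-- encodes no Python dict (rows are dicts), so no Python input A returns on is excluded.
def Pre_spec_coverage (rows : List (List (String × Option Int))) (category : String) : Prop :=
  ∀ r ∈ rows, (r.map Prod.fst).Nodup
instance (rows : List (List (String × Option Int))) (category : String) : Decidable (Pre_spec_coverage rows category) := by unfold Pre_spec_coverage; infer_instance
def pvWitness_spec_coverage : (List (List (String × Option Int))) × String :=
  ([[("gbps", some 10), ("max_watts", none)], [("gbps", none)]], "cables")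

def Spec_spec_coverage (rows : List (List (String × Option Int))) (category : String) (out : List (String × String)) : Prop := out = spec_coverage_alt rows category
instance (rows : List (List (String × Option Int))) (category : String) (out : List (String × String)) : Decidable (Spec_spec_coverage rows category out) := by unfold Spec_spec_coverage; infer_instance

-- ===== CLAIM (what is proved, stated in full; the proofs are below) =====
def Claim_equal_spec_coverage : Prop := ∀ (rows : List (List (String × Option Int))) (category : String), Dom_spec_coverage rows category → Pre_spec_coverage rows category → Spec_spec_coverage rows category (spec_coverage rows category)

-- ===== LEMMAS AND PROOFS =====

-- a key absent from a row contributes nothing to B's occurrence list of that row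
theorem count_row_not_mem (r : List (String × Option Int)) (c : String × Option Int → Bool)
    (f : String) (hf : f ∉ r.map Prod.fst) :
    ((r.filter c).map Prod.fst).count f = 0 := by
  refine List.count_eq_zero.mpr (fun hm => hf ?_)
  rcases List.mem_map.mp hm with ⟨p, hp, rfl⟩
  exact List.mem_map.mpr ⟨p, (List.mem_filter.mp hp).1, rfl⟩

-- one row of B's flattened list holds f exactly when A's probe r.get(f) is populated
theorem count_row (r : List (String × Option Int)) (req : List String) (f : String)
    (hf : f ∈ req) (hnd : (r.map Prod.fst).Nodup) :
    ((r.filter (fun p => p.2.isSome && (PySem.Set.ofList req).contains p.1)).map Prod.fst).count f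
    = if ((PySem.Dict.mk r).getD f none).isSome then 1 else 0 := by
  induction r with
  | nil => rfl
  | cons p r ih =>
    obtain ⟨k, v⟩ := p
    simp only [List.map_cons, List.nodup_cons] at hnd
    rw [PySem.Dict.getD_eq_get?_getD, PySem.Dict.get?_mk_cons]
    by_cases hk : k = f
    · subst hk
      have hrest := count_row_not_mem r
        (fun p => p.2.isSome && (PySem.Set.ofList req).contains p.1) k hnd.1
      cases v with
      | none => simpa [List.filter_cons] using hrest
      | some w => simpa [List.filter_cons, hf, List.count_cons] using hrest
    · have hne : (k == f) = false := by simpa using hk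
      have tail := ih hnd.2
      rw [PySem.Dict.getD_eq_get?_getD] at tail
      simp only [hne, Bool.false_eq_true, if_false, List.filter_cons]
      rw [← tail]
      split_ifs with hc
      · simp [List.count_cons, hne]
      · rfl

-- B's whole flattened list counts f as many times as A's probing pass over the rows
theorem count_present (rows : List (List (String × Option Int))) (req : List String) (f : String)
    (hf : f ∈ req) (hnd : ∀ r ∈ rows, (r.map Prod.fst).Nodup) :
    (rows.flatMap (fun row =>
        ((PySem.Dict.mk row).items.filter (fun p => p.2.isSome && (PySem.Set.ofList req).contains p.1)).map Prod.fst)).count f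
    = rows.countP (fun r => ((PySem.Dict.mk r).getD f none).isSome) := by
  induction rows with
  | nil => rfl
  | cons r rows ih =>
    rw [List.flatMap_cons, List.count_append, List.countP_cons,
        ih (fun x hx => hnd x (List.mem_cons_of_mem _ hx)),
        count_row r req f hf (hnd r (List.mem_cons_self ..))]
    split_ifs <;> omega

-- ===== VERDICT (by name: the statement is the Claim_ definition above) =====
theorem spec_coverage_spec : Claim_equal_spec_coverage := by
  intro rows category _ hpre
  show spec_coverage rows category = spec_coverage_alt rows category
  unfold spec_coverage spec_coverage_alt
  by_cases hz : ((rows.length : Int) == 0) = true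
  · simp only [hz, if_true]
  · simp only [Bool.not_eq_true] at hz
    simp only [hz, Bool.false_eq_true, if_false]
    congr 1
    apply PySem.List.foldl_congr_mem
    intro acc f hf
    rw [PySem.List.foldl_count_if, count_present rows _ f hf hpre, zero_add]
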